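-- pv_equiv track=rewrite | github.com/NGBigField/KagomePeriodicBP | scripts/tests/su_itai_vs_roy/itai/kagome_lattice.py | edges_dict_from_edges_list
-- ===== SOURCE A (Python) =====
-- from typing import Generator, Literal, Optional, Any, Callable, TypeVar, Final, TypeAlias, TypeGuard, Type, NamedTuple, Generic, Iterable
--
-- EdgesDictType       : TypeAlias = dict[str, tuple[int, int]]
--
-- def edges_dict_from_edges_list(edges_list:list[list[str]])->EdgesDictType:
--     vertices = {}
--     for i, i_edges in enumerate(edges_list):
--         for e in i_edges:
--             if e in vertices:
--                 (j1,j2) = vertices[e]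
--                 vertices[e] = (i,j1)
--             else:
--                 vertices[e] = (i,i)
--     return vertices
-- ===== SOURCE B (Python) =====
-- def edges_dict_from_edges_list(edges_list):
--     # pass 1: full incidence lists (every vertex index that mentions the edge, in order)
--     occ = {}
--     for i, i_edges in enumerate(edges_list):
--         for e in i_edges:
--             occ.setdefault(e, []).append(i)
--     # pass 2: reduce each occurrence list to the stored pair
--     result = {}
--     for e, lst in occ.items():
--         if len(lst) >= 2:
--             result[e] = (lst[-1], lst[-2])
--         else:
--             result[e] = (lst[0], lst[0])
--     return result
-- ===== Notes on version B (the rewrite author's own statement) =====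
-- stated objective: alternative
-- what changed: B replaces A's incremental pair-rewriting dict with two differently-shaped passes: first it groups the full incidence list of vertex indices per edge name, then it reduces each list to (last, second-to-last) occurrence (or (i,i) for a single occurrence).
import Mathlib
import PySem

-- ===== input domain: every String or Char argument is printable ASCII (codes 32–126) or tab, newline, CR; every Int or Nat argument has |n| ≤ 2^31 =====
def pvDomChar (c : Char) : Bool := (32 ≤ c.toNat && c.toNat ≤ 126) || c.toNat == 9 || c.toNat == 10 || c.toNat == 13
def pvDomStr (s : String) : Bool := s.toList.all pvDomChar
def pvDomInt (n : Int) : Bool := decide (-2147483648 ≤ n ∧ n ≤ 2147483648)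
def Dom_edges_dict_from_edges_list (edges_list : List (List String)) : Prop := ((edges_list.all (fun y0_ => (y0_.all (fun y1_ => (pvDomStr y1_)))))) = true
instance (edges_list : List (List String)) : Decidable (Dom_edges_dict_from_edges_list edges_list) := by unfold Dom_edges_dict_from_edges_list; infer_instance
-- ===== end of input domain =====

-- B builds full per-edge incidence lists in one pass and reduces each list to the stored
-- pair in a second pass, instead of A's incremental rewriting of the pair at each hit
-- (objective: alternative decomposition, same cost).

-- ===== PORT A =====
def edges_dict_from_edges_list (edges_list : List (List String)) : List (String × Int × Int) :=
  ((PySem.List.enumerate edges_list).foldl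
    (fun vertices p =>
      p.2.foldl (fun vertices e =>
        match vertices.get? e with
        | some (j1, _j2) => vertices.insert e (p.1, j1)
        | none => vertices.insert e (p.1, p.1)) vertices)
    PySem.Dict.empty).items

-- ===== PORT B =====
-- reduction of one occurrence list: (lst[-1], lst[-2]) if len(lst) >= 2 else (lst[0], lst[0]);
-- the .getD 0 defaults are never hit: the guards keep every index in range.
def pvTup (lst : List Int) : Int × Int :=
  if 2 ≤ lst.length then
    ((PySem.List.pyGet? lst (-1)).getD 0, (PySem.List.pyGet? lst (-2)).getD 0)
  else
    ((PySem.List.pyGet? lst 0).getD 0, (PySem.List.pyGet? lst 0).getD 0)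

def edges_dict_from_edges_list_alt (edges_list : List (List String)) : List (String × Int × Int) :=
  let occ := (PySem.List.enumerate edges_list).foldl
    (fun occ p => p.2.foldl (fun occ e => occ.modify e [] (· ++ [p.1])) occ)
    (PySem.Dict.empty : PySem.Dict String (List Int))
  (occ.items.foldl (fun result q => result.insert q.1 (pvTup q.2)) PySem.Dict.empty).items

-- ===== PRECONDITION & SPEC =====
def Spec_edges_dict_from_edges_list (edges_list : List (List String)) (out : List (String × Int × Int)) : Prop := out = edges_dict_from_edges_list_alt edges_list
instance (edges_list : List (List String)) (out : List (String × Int × Int)) : Decidable (Spec_edges_dict_from_edges_list edges_list out) := by unfold Spec_edges_dict_from_edges_list; infer_instance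

-- ===== CLAIM (what is proved, stated in full; the proofs are below) =====
def Claim_equal_edges_dict_from_edges_list : Prop := ∀ (edges_list : List (List String)), Dom_edges_dict_from_edges_list edges_list → Spec_edges_dict_from_edges_list edges_list (edges_dict_from_edges_list edges_list)

-- ===== LEMMAS AND PROOFS =====

-- the flattened occurrence stream: one (edge name, vertex index) pair per occurrence
def pvFlat (edges_list : List (List String)) : List (String × Int) :=
  (PySem.List.enumerate edges_list).flatMap (fun p => p.2.map (fun e => (e, p.1)))

-- A's loop body on one occurrence
def pvStepA (d : PySem.Dict String (Int × Int)) (q : String × Int) : PySem.Dict String (Int × Int) :=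
  match d.get? q.1 with
  | some (j1, _j2) => d.insert q.1 (q.2, j1)
  | none => d.insert q.1 (q.2, q.2)

-- (last, second-to-last) of an occurrence list, (i, i) for a singleton
def pvRed (l : List Int) : Int × Int :=
  match l.reverse with
  | a :: b :: _ => (a, b)
  | [a] => (a, a)
  | [] => (0, 0)

def pvPre (v : Option (Int × Int)) : List Int :=
  match v with
  | some (j1, _) => [j1]
  | none => []

lemma pv_nested_eq_flat {D σ ι : Type} (g : D → (σ × ι) → D) :
    ∀ (l : List (ι × List σ)) (d : D),
      l.foldl (fun d p => p.2.foldl (fun d e => g d (e, p.1)) d) d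
        = (l.flatMap (fun p => p.2.map (fun e => (e, p.1)))).foldl g d := by
  intro l
  induction l with
  | nil => intro d; rfl
  | cons p rest ih =>
      intro d
      simp [List.foldl_append, List.foldl_map, ih]

lemma pvStepA_eq (d : PySem.Dict String (Int × Int)) (q : String × Int) :
    pvStepA d q = d.insert q.1
      (match d.get? q.1 with
       | some (j1, _j2) => (q.2, j1)
       | none => (q.2, q.2)) := by
  unfold pvStepA
  cases h : d.get? q.1 with
  | none => rfl
  | some v => cases v; rfl

lemma pvRed_append (l l2 : List Int) (h : 2 ≤ l2.length) :
    pvRed (l ++ l2) = pvRed l2 := by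
  cases hrev : l2.reverse with
  | nil =>
      rw [← List.length_reverse (as := l2), hrev] at h; simp at h
  | cons c r =>
      cases r with
      | nil =>
          rw [← List.length_reverse (as := l2), hrev] at h; simp at h
      | cons c2 r2 =>
          simp [pvRed, List.reverse_append, hrev]

lemma pvRed_pre_single (v : Option (Int × Int)) (i : Int) :
    pvRed (pvPre v ++ [i]) =
      (match v with
       | some (j1, _j2) => (i, j1)
       | none => (i, i)) := by
  cases v with
  | none => simp [pvPre, pvRed]
  | some w => cases w; simp [pvPre, pvRed]

lemma pvFoldA_get? :
    ∀ (flat : List (String × Int)) (d : PySem.Dict String (Int × Int)) (k : String),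
      (flat.foldl pvStepA d).get? k =
        (if ((flat.filter (fun p => p.1 == k)).map (·.2)) = [] then d.get? k
         else some (pvRed (pvPre (d.get? k) ++ (flat.filter (fun p => p.1 == k)).map (·.2)))) := by
  intro flat
  induction flat with
  | nil => intro d k; simp
  | cons q rest ih =>
      intro d k
      obtain ⟨e, i⟩ := q
      by_cases hek : e = k
      · subst hek
        rw [List.foldl_cons, ih]
        have hget : (pvStepA d (e, i)).get? e =
            some (match d.get? e with
                  | some (j1, _j2) => (i, j1)
                  | none => (i, i)) := by
          rw [pvStepA_eq]
          simp [PySem.Dict.get?_insert_self]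
        have hfil : List.filter (fun p => p.1 == e) ((e, i) :: rest)
            = (e, i) :: rest.filter (fun p => p.1 == e) := by
          simp
        rw [hfil]
        by_cases hr : ((rest.filter (fun p => p.1 == e)).map (·.2)) = []
        · rw [if_pos hr, hget, List.map_cons, if_neg (by simp), hr]
          rw [pvRed_pre_single]
        · rw [if_neg hr, List.map_cons, if_neg (by simp), hget]
          cases hc : ((rest.filter (fun p => p.1 == e)).map (·.2)) with
          | nil => exact absurd hc hr
          | cons x xs =>
              have hfst : pvPre (some (match d.get? e with
                    | some (j1, _j2) => (i, j1)
                    | none => (i, i))) = [i] := by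
                cases hd : d.get? e with
                | none => rfl
                | some w => cases w; rfl
              rw [hfst]
              have h2 : 2 ≤ (i :: x :: xs).length := by simp
              simp [pvRed_append (pvPre (d.get? e)) (i :: x :: xs) h2]
      · rw [List.foldl_cons, ih]
        have hstep : (pvStepA d (e, i)).get? k = d.get? k := by
          rw [pvStepA_eq]
          exact PySem.Dict.get?_insert_of_ne _ _ (fun h => hek h.symm)
        have hfil : List.filter (fun p => p.1 == k) ((e, i) :: rest)
            = rest.filter (fun p => p.1 == k) := by
          simp [hek]
        rw [hstep, hfil]

-- B's grouping-loop body on one occurrence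
def pvStepB (d : PySem.Dict String (List Int)) (q : String × Int) : PySem.Dict String (List Int) :=
  d.modify q.1 [] (· ++ [q.2])

lemma pvA_eq_flat (edges_list : List (List String)) :
    edges_dict_from_edges_list edges_list
      = ((pvFlat edges_list).foldl pvStepA PySem.Dict.empty).items := by
  unfold edges_dict_from_edges_list pvFlat
  exact congrArg PySem.Dict.items (pv_nested_eq_flat pvStepA _ _)

lemma pvB_occ_eq_flat (edges_list : List (List String)) :
    ((PySem.List.enumerate edges_list).foldl
        (fun occ p => p.2.foldl (fun occ e => occ.modify e [] (· ++ [p.1])) occ)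
        (PySem.Dict.empty : PySem.Dict String (List Int)))
      = (pvFlat edges_list).foldl pvStepB PySem.Dict.empty := by
  unfold pvFlat
  exact pv_nested_eq_flat pvStepB _ _

lemma pvStepA_insert_form :
    pvStepA = (fun d (q : String × Int) => d.insert q.1
      (match d.get? q.1 with
       | some (j1, _j2) => (q.2, j1)
       | none => (q.2, q.2))) :=
  funext fun d => funext fun q => pvStepA_eq d q

lemma pvA_keys (flat : List (String × Int)) :
    (flat.foldl pvStepA PySem.Dict.empty).keys
      = PySem.Set.update ([] : List String) (flat.map (·.1)) := by
  rw [pvStepA_insert_form]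
  rw [PySem.Dict.keys_foldl_insert_key]
  simp

lemma pvA_nodup (flat : List (String × Int)) :
    (flat.foldl pvStepA PySem.Dict.empty).keys.Nodup := by
  rw [pvStepA_insert_form]
  exact PySem.Dict.nodup_keys_foldl_insert_key _ _ _ _ (by simp)

lemma pvB_keys (flat : List (String × Int)) :
    (flat.foldl pvStepB PySem.Dict.empty).keys
      = PySem.Set.update ([] : List String) (flat.map (·.1)) := by
  unfold pvStepB
  rw [PySem.Dict.keys_foldl_modify_key]
  simp

lemma pvB_nodup (flat : List (String × Int)) :
    (flat.foldl pvStepB PySem.Dict.empty).keys.Nodup := by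
  unfold pvStepB
  exact PySem.Dict.nodup_keys_foldl_modify_key _ _ _ _ _ (by simp)

lemma pvB_getD (flat : List (String × Int)) (k : String) :
    (flat.foldl pvStepB PySem.Dict.empty).getD k []
      = (flat.filter (fun p => p.1 == k)).map (·.2) := by
  unfold pvStepB
  rw [PySem.Dict.getD_foldl_modify_append]
  simp

lemma pvTup_eq_pvRed (l : List Int) (h : l ≠ []) : pvTup l = pvRed l := by
  cases hrev : l.reverse with
  | nil =>
      rw [List.reverse_eq_nil_iff] at hrev
      exact absurd hrev h
  | cons a r =>
      have hl : l = (a :: r).reverse := by rw [← hrev, List.reverse_reverse]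
      cases r with
      | nil =>
          subst hl
          simp [pvTup, pvRed, PySem.List.pyGet?, PySem.List.pyIdx?]
      | cons b t =>
          subst hl
          have hshape : (a :: b :: t).reverse = (t.reverse ++ [b]) ++ [a] := by
            simp
          have hlen : ((a :: b :: t).reverse).length = t.length + 2 := by simp
          have hred : pvRed ((a :: b :: t).reverse) = (a, b) := by
            simp [pvRed]
          have hm1 : PySem.List.pyGet? ((a :: b :: t).reverse) (-1) = some a := by
            rw [hshape]
            exact PySem.List.pyGet?_neg_one_append_singleton _ _
          have hm2 : PySem.List.pyGet? ((a :: b :: t).reverse) (-2) = some b := by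
            rw [PySem.List.pyGet?_neg_ofNat _ 2 (by omega) (by omega)]
            rw [hlen]
            rw [show t.length + 2 - 2 = t.length by omega]
            rw [hshape, show ((t.reverse ++ [b]) ++ [a]) = t.reverse ++ ([b] ++ [a]) by simp]
            rw [List.getElem?_append_right (by simp)]
            simp
          rw [hred]
          unfold pvTup
          rw [if_pos (by rw [hlen]; omega), hm1, hm2]
          rfl

lemma pv_occK_ne_nil (flat : List (String × Int)) (k : String)
    (hk : k ∈ flat.map (·.1)) :
    (flat.filter (fun p => p.1 == k)).map (·.2) ≠ [] := by
  obtain ⟨p, hp, hpk⟩ := List.mem_map.mp hk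
  intro hnil
  rw [List.map_eq_nil_iff, List.filter_eq_nil_iff] at hnil
  exact hnil p hp (by simp [hpk])

lemma pvA_getD (flat : List (String × Int)) (k : String)
    (hne : (flat.filter (fun p => p.1 == k)).map (·.2) ≠ []) :
    (flat.foldl pvStepA PySem.Dict.empty).getD k (0, 0)
      = pvRed ((flat.filter (fun p => p.1 == k)).map (·.2)) := by
  rw [PySem.Dict.getD_eq_get?_getD, pvFoldA_get?]
  simp [hne, pvPre]

-- ===== VERDICT (by name: the statement is the Claim_ definition above) =====
theorem edges_dict_from_edges_list_spec : Claim_equal_edges_dict_from_edges_list := by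
  intro edges_list _
  unfold Spec_edges_dict_from_edges_list
  rw [pvA_eq_flat]
  unfold edges_dict_from_edges_list_alt
  rw [pvB_occ_eq_flat]
  set flat := pvFlat edges_list with hflat
  set occ := flat.foldl pvStepB PySem.Dict.empty with hocc
  -- B's second loop over fresh distinct keys appends
  have hfresh : ∀ a ∈ occ.items, (PySem.Dict.empty : PySem.Dict String (Int × Int)).contains a.1 = false := by
    intro a _; simp [PySem.Dict.contains_empty]
  have hmapnodup : (occ.items.map (·.1)).Nodup := pvB_nodup flat
  have hBitems : ((occ.items.foldl (fun result q => result.insert q.1 (pvTup q.2)) PySem.Dict.empty)).items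
      = occ.items.map (fun a => (a.1, pvTup a.2)) := by
    rw [PySem.Dict.items_foldl_insert_fresh occ.items (fun q => q.1) (fun q => pvTup q.2) PySem.Dict.empty hfresh hmapnodup]
    rfl
  rw [hBitems]
  rw [PySem.Dict.items_eq_map_keys occ (pvB_nodup flat) []]
  rw [PySem.Dict.items_eq_map_keys _ (pvA_nodup flat) (0, 0)]
  rw [pvA_keys, pvB_keys, List.map_map]
  apply List.map_congr_left
  intro k hk
  have hkmem : k ∈ flat.map (·.1) := by
    have : PySem.Set.update ([] : List String) (flat.map (·.1)) = PySem.Set.ofList (flat.map (·.1)) := rfl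
    rw [this, PySem.Set.mem_ofList] at hk
    exact hk
  have hne := pv_occK_ne_nil flat k hkmem
  simp only [Function.comp]
  rw [pvA_getD flat k hne, pvB_getD flat k, pvTup_eq_pvRed _ hne]
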